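-- pv_equiv track=rewrite | github.com/Siyun0316/Python_Leetcode | Hash/Hash_Number_of_Matching_Subsequences.py | numOfMatchSubseq
-- ===== SOURCE A (Python) =====
-- from collections import defaultdict
--
-- def numOfMatchSubseq(s, words):
--     '''
--     :param s string:
--     :param words List[str]:
--     :return int:
--     '''
--     tmp_dic = defaultdict(list)
--     count = 0
--     for x in words:
--         tmp_dic[x[0]].append(x)
--     for char in s:
--         for w in tmp_dic.pop(char):
--             if len(w) ==1:
--                 count +=1
--             else:
--                 tmp_dic[w[1]].append(w[1:])
--     return count
-- ===== SOURCE B (Python) =====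
-- def numOfMatchSubseq(s, words):
--     count = 0
--     for w in words:
--         it = iter(s)
--         if w[0] in it and all(c in it for c in w[1:]):
--             count += 1
--     return count
-- ===== Notes on version B (the rewrite author's own statement) =====
-- stated objective: idiomatic
-- what changed: Replaces A's shared bucket-dictionary streamed once over s by an independent per-word greedy subsequence check that consumes an iterator over s.
import Mathlib
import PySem

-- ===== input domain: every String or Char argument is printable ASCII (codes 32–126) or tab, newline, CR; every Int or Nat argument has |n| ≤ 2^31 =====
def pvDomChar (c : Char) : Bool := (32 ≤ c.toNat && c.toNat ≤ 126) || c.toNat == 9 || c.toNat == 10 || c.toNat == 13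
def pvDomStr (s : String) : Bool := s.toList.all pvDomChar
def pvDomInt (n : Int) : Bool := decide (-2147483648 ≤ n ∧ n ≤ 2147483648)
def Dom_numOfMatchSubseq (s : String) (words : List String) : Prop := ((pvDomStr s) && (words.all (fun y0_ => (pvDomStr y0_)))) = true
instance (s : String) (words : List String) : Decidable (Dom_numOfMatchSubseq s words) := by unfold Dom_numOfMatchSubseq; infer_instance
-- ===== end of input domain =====

-- B replaces A's shared bucket-dictionary (streamed once over s) by an independent
-- per-word greedy subsequence check; same count on every input where A returns.

-- ===== PORT A =====
-- Strings are handled as their character lists; the dict maps a char to the list of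
-- pending (suffix) words whose next needed char is that key, as in the Python.

-- tmp_dic[x[0]].append(x)  (none = IndexError on an empty word)
def aPush (d : PySem.Dict Char (List (List Char))) (w : List Char) :
    Option (PySem.Dict Char (List (List Char))) :=
  match w with
  | [] => none
  | c :: _ => some (d.insert c (d.getD c [] ++ [w]))

-- body of the inner 'for w in tmp_dic.pop(char)' loop (none = IndexError at w[1])
def aInner (st : PySem.Dict Char (List (List Char)) × Int) (w : List Char) :
    Option (PySem.Dict Char (List (List Char)) × Int) :=
  if w.length = 1 then some (st.1, st.2 + 1)
  else
    match w with
    | _ :: y :: t => some (st.1.insert y (st.1.getD y [] ++ [y :: t]), st.2)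
    | _ => none

-- one iteration of 'for char in s' (none = KeyError from tmp_dic.pop(char))
def aChar (st : PySem.Dict Char (List (List Char)) × Int) (c : Char) :
    Option (PySem.Dict Char (List (List Char)) × Int) :=
  match st.1.pop? c with
  | none => none
  | some (bucket, d') =>
      bucket.foldl (fun o w => o.bind (fun p => aInner p w)) (some (d', st.2))

def numOfMatchSubseq (s : String) (words : List String) : Int :=
  match words.foldl (fun o x => o.bind (fun d => aPush d x.toList)) (some PySem.Dict.empty) with
  | none => 0
  | some d =>
    match s.toList.foldl (fun o c => o.bind (fun p => aChar p c)) (some (d, (0 : Int))) with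
    | none => 0
    | some p => p.2

-- ===== PORT B =====
-- 'w[0] in it and all(c in it for c in w[1:])' with it = iter(s): consume s left to
-- right looking for each char of w in turn (first w[0], then the rest).
def isSub : List Char → List Char → Bool
  | [], _ => true
  | _ :: _, [] => false
  | c :: w, d :: t => if d = c then isSub w t else isSub (c :: w) t

-- On an empty word the Python B raises IndexError at w[0] (outside Pre_); the port
-- leaves the count unchanged there.
def numOfMatchSubseq_alt (s : String) (words : List String) : Int :=
  words.foldl (fun count w =>
    match w.toList with
    | [] => count
    | c :: cs => if isSub (c :: cs) s.toList then count + 1 else count) 0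

-- ===== PRECONDITION & SPEC =====
-- residual of word w after greedily matching it against a prefix p of s
def gStep (r : List Char) (c : Char) : List Char := if r.head? = some c then r.tail else r
def gDrop (w : List Char) (p : List Char) : List Char := p.foldl gStep w

-- Pre_ excludes exactly the inputs on which A raises: an empty word (IndexError at
-- x[0]) or a char of s that is not the next-needed char of any pending word
-- (KeyError at tmp_dic.pop(char)); B returns the subsequence count there.
def Pre_numOfMatchSubseq (s : String) (words : List String) : Prop :=
  (∀ w ∈ words, w ≠ "") ∧
  ∀ i ∈ List.range s.toList.length,
    ∃ w ∈ words, (gDrop w.toList (s.toList.take i)).head? = s.toList[i]?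
instance (s : String) (words : List String) : Decidable (Pre_numOfMatchSubseq s words) := by
  unfold Pre_numOfMatchSubseq; infer_instance

def pvWitness_numOfMatchSubseq : String × List String := ("ab", ["ab", "b"])

def Spec_numOfMatchSubseq (s : String) (words : List String) (out : Int) : Prop :=
  out = numOfMatchSubseq_alt s words
instance (s : String) (words : List String) (out : Int) : Decidable (Spec_numOfMatchSubseq s words out) := by
  unfold Spec_numOfMatchSubseq; infer_instance

-- ===== CLAIM (what is proved, stated in full; the proofs are below) =====
def Claim_equal_numOfMatchSubseq : Prop := ∀ (s : String) (words : List String), Dom_numOfMatchSubseq s words → Pre_numOfMatchSubseq s words → Spec_numOfMatchSubseq s words (numOfMatchSubseq s words)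

-- ===== LEMMAS AND PROOFS =====

theorem witness_pre : Dom_numOfMatchSubseq (pvWitness_numOfMatchSubseq.1) (pvWitness_numOfMatchSubseq.2) ∧ Pre_numOfMatchSubseq (pvWitness_numOfMatchSubseq.1) (pvWitness_numOfMatchSubseq.2) := by
  decide

-- tails of words whose next char was just consumed, dropping the finished ones
def advT (L : List (List Char)) : List (List Char) :=
  L.filterMap (fun w => if w.length = 1 then none else some w.tail)

theorem gDrop_append (w p : List Char) (x : Char) : gDrop w (p ++ [x]) = gStep (gDrop w p) x := by
  simp [gDrop, List.foldl_append]

theorem countP_advT (q : List Char → Bool) (L : List (List Char)) :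
    (advT L).countP q = L.countP (fun w => !(w.length == 1) && q w.tail) := by
  induction L with
  | nil => rfl
  | cons w L ih =>
    by_cases h : w.length = 1 <;> simp [advT, List.countP_cons, h] at * <;> omega

-- advT of nonempty lists = map tail minus the emptied ones, filtered by head

theorem key_count (t' : List Char) (x : Char) (R : List (List Char)) (h : ∀ r ∈ R, r ≠ []) :
    R.countP (fun r => isSub r (x :: t')) =
      R.countP (fun r => r.head? == some x && r.length == 1) +
      (R.countP (fun r => !(r.head? == some x) && isSub r t') +
       R.countP (fun r => r.head? == some x && (!(r.length == 1) && isSub r.tail t'))) := by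
  induction R with
  | nil => rfl
  | cons r R ih =>
    have hr : r ≠ [] := h r (by simp)
    have hrest : ∀ w ∈ R, w ≠ [] := fun w hw => h w (by simp [hw])
    obtain ⟨a, r2, rfl⟩ : ∃ a r2, r = a :: r2 := by
      match r, hr with | a :: r2, _ => exact ⟨a, r2, rfl⟩
    by_cases hax : a = x
    · subst hax
      cases r2 with
      | nil => simp [List.countP_cons, isSub, ih hrest]; omega
      | cons b r3 => simp [List.countP_cons, isSub, ih hrest]; omega
    · have hxa : ¬ x = a := fun h => hax h.symm
      have : isSub (a :: r2) (x :: t') = isSub (a :: r2) t' := by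
        simp [isSub, hxa]
      simp [List.countP_cons, this, hax, Ne.symm hax, ih hrest]; omega

-- mapping gStep then dropping empties = the same on the nonempty part

theorem filter_map_gStep (x : Char) (M : List (List Char)) :
    (M.map (gStep · x)).filter (fun r => !r.isEmpty) =
      ((M.filter (fun r => !r.isEmpty)).map (gStep · x)).filter (fun r => !r.isEmpty) := by
  induction M with
  | nil => rfl
  | cons m M ih =>
    by_cases hm : m = []
    · subst hm; simpa [gStep] using ih
    · obtain ⟨a, m2, rfl⟩ : ∃ a m2, m = a :: m2 := by
        match m, hm with | a :: m2, _ => exact ⟨a, m2, rfl⟩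
      simp only [List.map_cons, List.filter_cons, ih]
      by_cases hh : (gStep (a :: m2) x).isEmpty <;> simp [hh]

-- the rebuilt pending list is a permutation of the stepped residuals

theorem perm_step (x : Char) (R : List (List Char)) (h : ∀ r ∈ R, r ≠ []) :
    (R.filter (fun r => !(r.head? == some x)) ++ advT (R.filter (fun r => r.head? == some x))).Perm
      ((R.map (gStep · x)).filter (fun r => !r.isEmpty)) := by
  induction R with
  | nil => simp [advT]
  | cons r R ih =>
    have hr : r ≠ [] := h r (by simp)
    have hrest : ∀ w ∈ R, w ≠ [] := fun w hw => h w (by simp [hw])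
    obtain ⟨a, r2, rfl⟩ : ∃ a r2, r = a :: r2 := by
      match r, hr with | a :: r2, _ => exact ⟨a, r2, rfl⟩
    by_cases hax : a = x
    · subst hax
      cases r2 with
      | nil =>
        simpa [List.filter_cons, advT, gStep] using ih hrest
      | cons b r3 =>
        have hh := ih hrest
        simp only [advT] at hh ⊢
        have hstep : gStep (a :: b :: r3) a = b :: r3 := by simp [gStep]
        simp only [List.filter_cons, List.map_cons, List.filterMap_cons, hstep]
        simp only [show ((a :: b :: r3).head? == some a) = true by simp, Bool.not_true,
          show ((a :: b :: r3).length = 1) = False by simp, if_false, Bool.false_eq_true,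
          show ((b :: r3).isEmpty : Bool) = false by simp, Bool.not_false, if_true]
        exact List.Perm.trans List.perm_middle (hh.cons (b :: r3))
    · have hxa : ¬ (a :: r2).head? = some x := by simp [hax]
      have hstep : gStep (a :: r2) x = a :: r2 := by simp [gStep, hax]
      simp only [List.filter_cons, List.map_cons, hstep]
      simp only [show ((a :: r2).head? == some x) = false by simp [hax], Bool.not_false,
        if_true, if_false, cond_true, cond_false]
      simp only [show ((a :: r2).isEmpty : Bool) = false by simp, Bool.not_false, if_true]
      exact (ih hrest).cons (a :: r2)

theorem dict_get?_erase (d : PySem.Dict Char (List (List Char))) (k k' : Char) :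
    (d.erase k).get? k' = if k' = k then none else d.get? k' := by
  obtain ⟨items⟩ := d
  induction items with
  | nil => simp [PySem.Dict.erase, PySem.Dict.get?]
  | cons p rest ih =>
    simp only [PySem.Dict.erase, PySem.Dict.get?, List.filter_cons] at *
    by_cases h1 : p.1 = k <;> by_cases h2 : p.1 = k' <;> simp_all

theorem dict_getD_erase (d : PySem.Dict Char (List (List Char))) (k k' : Char) :
    (d.erase k).getD k' [] = if k' = k then [] else d.getD k' [] := by
  simp only [PySem.Dict.getD_eq_get?_getD, dict_get?_erase]
  by_cases h : k' = k <;> simp [h]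

theorem build_fold (L : List String) : ∀ (d : PySem.Dict Char (List (List Char))),
    (∀ w ∈ L, w ≠ "") →
    (∀ c b, d.get? c = some b → b ≠ []) →
    ∃ d', L.foldl (fun o x => o.bind (fun d => aPush d x.toList)) (some d) = some d' ∧
      (∀ c, d'.getD c [] = d.getD c [] ++ (L.map (·.toList)).filter (fun r => r.head? == some c)) ∧
      (∀ c b, d'.get? c = some b → b ≠ []) := by
  induction L with
  | nil => exact fun d _ hne => ⟨d, rfl, by simp, hne⟩
  | cons x L ih =>
    intro d hL hne
    have hx : x.toList ≠ [] := by simpa using hL x (by simp)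
    obtain ⟨a, r, hxl⟩ : ∃ a r, x.toList = a :: r := by
      match h : x.toList, hx with | a :: r, _ => exact ⟨a, r, rfl⟩
    have hrest : ∀ w ∈ L, w ≠ "" := fun w hw => hL w (by simp [hw])
    set d1 := d.insert a (d.getD a [] ++ [x.toList]) with hd1
    have hne1 : ∀ c b, d1.get? c = some b → b ≠ [] := by
      intro c b hb
      rw [hd1, PySem.Dict.get?_insert] at hb
      by_cases hca : c = a
      · simp [hca] at hb; simp [← hb]
      · exact hne c b (by simpa [hca] using hb)
    obtain ⟨d', hfold, hbuck, hne'⟩ := ih d1 hrest hne1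
    refine ⟨d', ?_, ?_, hne'⟩
    · have hstep : aPush d x.toList = some d1 := by rw [hd1, hxl]; rfl
      simpa [List.foldl_cons, hstep] using hfold
    · intro c
      rw [hbuck c, hd1, PySem.Dict.getD_insert]
      by_cases hca : c = a
      · simp [hca, hxl, List.filter_cons, List.append_assoc]
      · have hac : ¬ a = c := fun h => hca h.symm
        have : ((x.toList).head? == some c) = false := by simp [hxl, hac]
        simp [hca, List.filter_cons, this]

theorem inner_fold (B : List (List Char)) : ∀ (d : PySem.Dict Char (List (List Char))) (cnt : Int),
    (∀ w ∈ B, w ≠ []) →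
    (∀ c b, d.get? c = some b → b ≠ []) →
    ∃ d', B.foldl (fun o w => o.bind (fun p => aInner p w)) (some (d, cnt)) =
        some (d', cnt + (B.countP (fun w => w.length == 1) : Int)) ∧
      (∀ c, d'.getD c [] = d.getD c [] ++ (advT B).filter (fun r => r.head? == some c)) ∧
      (∀ c b, d'.get? c = some b → b ≠ []) := by
  induction B with
  | nil => exact fun d cnt _ hne => ⟨d, by simp, by simp [advT], hne⟩
  | cons w B ih =>
    intro d cnt hB hne
    have hw : w ≠ [] := hB w (by simp)
    have hrest : ∀ w ∈ B, w ≠ [] := fun w hw => hB w (by simp [hw])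
    by_cases h1 : w.length = 1
    · obtain ⟨d', hfold, hbuck, hne'⟩ := ih d (cnt + 1) hrest hne
      refine ⟨d', ?_, ?_, hne'⟩
      · rw [List.foldl_cons]
        have hstep : aInner (d, cnt) w = some (d, cnt + 1) := by simp [aInner, h1]
        simp only [Option.bind_some, hstep, hfold, List.countP_cons]
        congr 1
        simp [h1]; push_cast; ring
      · intro c
        rw [hbuck c]
        have : advT (w :: B) = advT B := by simp [advT, h1]
        rw [this]
    · obtain ⟨a, y, t, hwl⟩ : ∃ a y t, w = a :: y :: t := by
        match w, hw, h1 with | a :: y :: t, _, _ => exact ⟨a, y, t, rfl⟩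
      set d1 := d.insert y (d.getD y [] ++ [y :: t]) with hd1
      have hne1 : ∀ c b, d1.get? c = some b → b ≠ [] := by
        intro c b hb
        rw [hd1, PySem.Dict.get?_insert] at hb
        by_cases hcy : c = y
        · simp [hcy] at hb; simp [← hb]
        · exact hne c b (by simpa [hcy] using hb)
      obtain ⟨d', hfold, hbuck, hne'⟩ := ih d1 cnt hrest hne1
      refine ⟨d', ?_, ?_, hne'⟩
      · rw [List.foldl_cons]
        have hstep : aInner (d, cnt) w = some (d1, cnt) := by
          rw [hd1, hwl]; simp [aInner, h1, hwl.symm ▸ h1]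
        simp only [Option.bind_some, hstep, hfold, List.countP_cons]
        congr 2
        simp [hwl, show ¬((a :: y :: t).length = 1) by simp]
      · intro c
        rw [hbuck c, hd1, PySem.Dict.getD_insert]
        have hadv : advT (w :: B) = (y :: t) :: advT B := by
          simp [advT, hwl, h1, List.filterMap_cons, hwl ▸ h1]
        rw [hadv, List.filter_cons]
        by_cases hcy : c = y
        · simp [hcy, List.append_assoc]
        · have hyc : ¬ y = c := fun h => hcy h.symm
          simp [hcy, hyc]

theorem filter_not_hd (R : List (List Char)) (x c : Char) :
    (R.filter (fun r => !(r.head? == some x))).filter (fun r => r.head? == some c) =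
      if c = x then [] else R.filter (fun r => r.head? == some c) := by
  by_cases hcx : c = x
  · subst hcx
    rw [if_pos rfl, List.filter_eq_nil_iff]
    intro a ha
    have := List.of_mem_filter ha
    simp_all
  · rw [if_neg hcx, List.filter_filter]
    apply List.filter_congr
    intro a _
    by_cases hc : a.head? = some c
    · simp [hc, hcx]
    · simp [hc]

theorem main_loop (t : List Char) : ∀ (p : List Char) (d : PySem.Dict Char (List (List Char)))
    (R : List (List Char)) (cnt : Int) (ws : List (List Char)),
    (∀ i ∈ List.range t.length, ∃ w ∈ ws, (gDrop w (p ++ t.take i)).head? = t[i]?) →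
    R.Perm ((ws.map (fun w => gDrop w p)).filter (fun r => !r.isEmpty)) →
    (∀ c, d.getD c [] = R.filter (fun r => r.head? == some c)) →
    (∀ c b, d.get? c = some b → b ≠ []) →
    ∃ d', t.foldl (fun o c => o.bind (fun p => aChar p c)) (some (d, cnt)) =
      some (d', cnt + (R.countP (fun r => isSub r t) : Int)) := by
  induction t with
  | nil =>
    intro p d R cnt ws _ hperm _ _
    have hz : R.countP (fun r => isSub r []) = 0 := by
      rw [List.countP_eq_zero]
      intro r hr
      have : r ∈ (ws.map (fun w => gDrop w p)).filter (fun r => !r.isEmpty) :=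
        hperm.mem_iff.mp hr
      have hne := List.of_mem_filter this
      match r, hne with
      | a :: r2, _ => simp [isSub]
    exact ⟨d, by simp [hz]⟩
  | cons x t' ih =>
    intro p d R cnt ws hpre hperm hbuck hne
    have hRne : ∀ r ∈ R, r ≠ [] := by
      intro r hr
      have := List.of_mem_filter (hperm.mem_iff.mp hr)
      simp_all [List.isEmpty_iff]
    -- the bucket for x is nonempty
    obtain ⟨w0, hw0, hhd⟩ := hpre 0 (by simp)
    rw [List.take_zero, List.append_nil] at hhd
    have hx0 : (x :: t')[0]? = some x := rfl
    rw [hx0] at hhd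
    have hr0mem : gDrop w0 p ∈ R := by
      apply hperm.mem_iff.mpr
      apply List.mem_filter.mpr
      refine ⟨List.mem_map.mpr ⟨w0, hw0, rfl⟩, ?_⟩
      match h : gDrop w0 p, hhd with
      | a :: r2, _ => simp
    have hbne : R.filter (fun r => r.head? == some x) ≠ [] := by
      intro hnil
      have : gDrop w0 p ∈ R.filter (fun r => r.head? == some x) :=
        List.mem_filter.mpr ⟨hr0mem, by simp [hhd]⟩
      simp [hnil] at this
    have hgd : d.getD x [] ≠ [] := by rw [hbuck x]; exact hbne
    obtain ⟨b, hget⟩ : ∃ b, d.get? x = some b := by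
      cases hg : d.get? x with
      | none => exact absurd (by rw [PySem.Dict.getD_eq_get?_getD, hg]; rfl) hgd
      | some b => exact ⟨b, rfl⟩
    have hbval : b = R.filter (fun r => r.head? == some x) := by
      rw [← hbuck x, PySem.Dict.getD_eq_get?_getD, hget]; rfl
    -- one step of the outer loop
    have hpop : d.pop? x = some (b, d.erase x) := by
      simp [PySem.Dict.pop?, hget]
    have hbne' : ∀ w ∈ b, w ≠ [] := by
      intro w hw
      exact hRne w (List.mem_of_mem_filter (hbval ▸ hw))
    have hneE : ∀ c b', (d.erase x).get? c = some b' → b' ≠ [] := by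
      intro c b' hb'
      rw [dict_get?_erase] at hb'
      by_cases hcx : c = x
      · simp [hcx] at hb'
      · exact hne c b' (by simpa [hcx] using hb')
    obtain ⟨d1, hfold1, hbuck1, hne1⟩ := inner_fold b (d.erase x) cnt hbne' hneE
    have hstep : aChar (d, cnt) x = some (d1, cnt + (b.countP (fun w => w.length == 1) : Int)) := by
      simp only [aChar, hpop]
      exact hfold1
    -- the new pending list
    set R' := R.filter (fun r => !(r.head? == some x)) ++ advT (R.filter (fun r => r.head? == some x)) with hR'
    have hbuck' : ∀ c, d1.getD c [] = R'.filter (fun r => r.head? == some c) := by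
      intro c
      rw [hbuck1 c, dict_getD_erase, hbuck c, hR', List.filter_append, filter_not_hd, hbval]
    have hperm' : R'.Perm ((ws.map (fun w => gDrop w (p ++ [x]))).filter (fun r => !r.isEmpty)) := by
      have h1 : ws.map (fun w => gDrop w (p ++ [x])) = (ws.map (fun w => gDrop w p)).map (gStep · x) := by
        rw [List.map_map]; exact List.map_congr_left (fun w _ => gDrop_append w p x)
      rw [h1, filter_map_gStep x]
      refine (perm_step x R hRne).trans ?_
      exact ((hperm.map (gStep · x)).filter _)
    have hpre' : ∀ i ∈ List.range t'.length, ∃ w ∈ ws, (gDrop w ((p ++ [x]) ++ t'.take i)).head? = t'[i]? := by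
      intro i hi
      obtain ⟨w, hw, hgw⟩ := hpre (i + 1) (by simp at hi ⊢; omega)
      refine ⟨w, hw, ?_⟩
      rw [List.take_succ_cons] at hgw
      simpa [List.append_assoc] using hgw
    obtain ⟨d', hrec⟩ := ih (p ++ [x]) d1 R' (cnt + (b.countP (fun w => w.length == 1) : Int)) ws hpre' hperm' hbuck' hne1
    refine ⟨d', ?_⟩
    rw [List.foldl_cons]
    simp only [Option.bind_some, hstep, hrec]
    -- counting identity
    have hcount : R.countP (fun r => isSub r (x :: t')) =
        b.countP (fun w => w.length == 1) + R'.countP (fun r => isSub r t') := by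
      rw [key_count t' x R hRne, hR', List.countP_append, hbval,
        List.countP_filter, List.countP_filter, countP_advT, List.countP_filter]
      have e1 : R.countP (fun a => (a.length == 1) && (a.head? == some x)) =
          R.countP (fun r => (r.head? == some x) && (r.length == 1)) := by
        apply List.countP_congr; intro a _; rw [Bool.and_comm]
      have e2 : R.countP (fun a => (!(a.length == 1) && isSub a.tail t') && (a.head? == some x)) =
          R.countP (fun r => (r.head? == some x) && (!(r.length == 1) && isSub r.tail t')) := by
        apply List.countP_congr; intro a _; rw [Bool.and_comm]
      have e3 : R.countP (fun a => isSub a t' && !(a.head? == some x)) =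
          R.countP (fun r => !(r.head? == some x) && isSub r t') := by
        apply List.countP_congr; intro a _; rw [Bool.and_comm]
      rw [e1, e2, e3]
    rw [hcount]
    simp [add_assoc]

theorem alt_countP (sl : List Char) (L : List String) : ∀ (acc : Int), (∀ w ∈ L, w ≠ "") →
    L.foldl (fun count w =>
      match w.toList with
      | [] => count
      | c :: cs => if isSub (c :: cs) sl then count + 1 else count) acc =
      acc + (L.countP (fun w => isSub w.toList sl) : Int) := by
  induction L with
  | nil => simp
  | cons w L ih =>
    intro acc hne
    have hw : w.toList ≠ [] := by simpa using hne w (by simp)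
    obtain ⟨c, cs, hcl⟩ : ∃ c cs, w.toList = c :: cs := by
      match h : w.toList, hw with | c :: cs, _ => exact ⟨c, cs, rfl⟩
    have hrest : ∀ w ∈ L, w ≠ "" := fun w hw => hne w (by simp [hw])
    rw [List.foldl_cons, List.countP_cons, hcl]
    by_cases h : isSub (c :: cs) sl
    · rw [if_pos h, ih _ hrest]
      simp [hcl, h]
      omega
    · rw [if_neg h, ih _ hrest]
      simp [hcl, h]

-- ===== VERDICT (by name: the statement is the Claim_ definition above) =====
theorem numOfMatchSubseq_spec : Claim_equal_numOfMatchSubseq := by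
  intro s words _ hpre
  obtain ⟨hwne, hneed⟩ := hpre
  have hne0 : ∀ c b, (PySem.Dict.empty : PySem.Dict Char (List (List Char))).get? c = some b → b ≠ [] := by
    intro c b h; rw [PySem.Dict.get?_empty] at h; exact absurd h (by simp)
  obtain ⟨d0, hbuild, hbuck0, hne0'⟩ := build_fold words PySem.Dict.empty hwne hne0
  have hwsne : ∀ w ∈ words.map (·.toList), w ≠ [] := by
    intro w hw
    obtain ⟨x, hx, rfl⟩ := List.mem_map.mp hw
    simpa using hwne x hx
  have hbuckR : ∀ c, d0.getD c [] = (words.map (·.toList)).filter (fun r => r.head? == some c) := by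
    intro c; rw [hbuck0 c, PySem.Dict.getD_empty, List.nil_append]
  have hperm : (words.map (·.toList)).Perm
      (((words.map (·.toList)).map (fun w => gDrop w [])).filter (fun r => !r.isEmpty)) := by
    have h1 : (words.map (·.toList)).map (fun w => gDrop w []) = words.map (·.toList) := by
      simp [gDrop]
    rw [h1, List.filter_eq_self.mpr]
    intro a ha
    simpa [List.isEmpty_iff] using hwsne a ha
  have hpre' : ∀ i ∈ List.range s.toList.length, ∃ w ∈ words.map (·.toList),
      (gDrop w ([] ++ s.toList.take i)).head? = s.toList[i]? := by
    intro i hi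
    obtain ⟨w, hw, hgw⟩ := hneed i hi
    exact ⟨w.toList, List.mem_map.mpr ⟨w, hw, rfl⟩, by simpa using hgw⟩
  obtain ⟨d', hloop⟩ := main_loop s.toList [] d0 (words.map (·.toList)) 0 (words.map (·.toList))
    hpre' hperm hbuckR hne0'
  show numOfMatchSubseq s words = numOfMatchSubseq_alt s words
  rw [numOfMatchSubseq, hbuild]
  dsimp only
  rw [hloop]
  dsimp only
  rw [numOfMatchSubseq_alt, alt_countP s.toList words 0 hwne, List.countP_map]
  simp only [zero_add, Nat.cast_inj]
  rfl
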